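-- pv_equiv track=rewrite | github.com/Eythan31/Stamped-handles-repeated-names | handles-script-shortened.py | count_homonyms
-- ===== SOURCE A (Python) =====
-- def count_homonyms(comb):
--     count = 0
--     for i in range(0, len(comb)) :
--         for j in range(i+1, len(comb)):
--             seal1 = comb[i]
--             seal2 = comb[j]
--             if seal1[0] == seal2[0]:
--                 count = count+1
--     return count
-- ===== SOURCE B (Python) =====
-- def count_homonyms(comb):
--     counts = {}
--     for s in comb:
--         k = s[:1]
--         counts[k] = counts.get(k, 0) + 1
--     total = 0
--     for c in counts.values():
--         total += c * (c - 1) // 2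
--     return total
-- ===== Notes on version B (the rewrite author's own statement) =====
-- stated objective: faster
-- what changed: A compares the first characters of all O(n^2) index pairs in a nested loop; B makes one pass building a dict of first-character counts and sums c*(c-1)//2 per group.
import Mathlib
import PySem

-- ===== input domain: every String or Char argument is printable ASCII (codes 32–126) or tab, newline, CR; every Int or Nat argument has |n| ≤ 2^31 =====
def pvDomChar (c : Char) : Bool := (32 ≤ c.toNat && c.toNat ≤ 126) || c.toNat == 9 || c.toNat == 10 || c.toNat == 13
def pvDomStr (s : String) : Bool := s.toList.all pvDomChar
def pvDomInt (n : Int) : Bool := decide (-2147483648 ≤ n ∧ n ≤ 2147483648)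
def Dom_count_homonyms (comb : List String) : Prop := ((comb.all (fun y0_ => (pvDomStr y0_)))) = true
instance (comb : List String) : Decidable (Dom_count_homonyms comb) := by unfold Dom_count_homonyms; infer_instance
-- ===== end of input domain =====

-- B replaces A's quadratic double index loop by a single counting pass over first
-- characters plus a closed-form c*(c-1)//2 per group (objective: faster).

-- ===== PORT A =====
def count_homonyms (comb : List String) : Int :=
  (PySem.List.pyRange 0 (comb.length : Int) 1).foldl (fun count i =>
    (PySem.List.pyRange (i + 1) (comb.length : Int) 1).foldl (fun count j =>
      if PySem.Str.pyGet? (PySem.List.pyGetD comb i "") 0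
         = PySem.Str.pyGet? (PySem.List.pyGetD comb j "") 0
      then count + 1 else count) count) 0

-- ===== PORT B =====
def count_homonyms_alt (comb : List String) : Int :=
  let counts := comb.foldl (fun d s =>
    d.insert (PySem.Str.slice s none (some 1))
      (d.getD (PySem.Str.slice s none (some 1)) 0 + 1)) PySem.Dict.empty
  counts.values.foldl (fun total c => total + PySem.Int.floordiv (c * (c - 1)) 2) 0

-- ===== PRECONDITION & SPEC =====
-- Pre_ excludes exactly the inputs on which A raises IndexError: lists of length ≥ 2
-- containing an empty string (every element's first character is accessed there).
def Pre_count_homonyms (comb : List String) : Prop :=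
  comb.length ≤ 1 ∨ ∀ s ∈ comb, s ≠ ""
instance (comb : List String) : Decidable (Pre_count_homonyms comb) := by
  unfold Pre_count_homonyms; infer_instance
def pvWitness_count_homonyms : List String := ["ab", "ax", "b"]

def Spec_count_homonyms (comb : List String) (out : Int) : Prop := out = count_homonyms_alt comb
instance (comb : List String) (out : Int) : Decidable (Spec_count_homonyms comb out) := by unfold Spec_count_homonyms; infer_instance

-- ===== CLAIM (what is proved, stated in full; the proofs are below) =====
def Claim_equal_count_homonyms : Prop := ∀ (comb : List String), Dom_count_homonyms comb → Pre_count_homonyms comb → Spec_count_homonyms comb (count_homonyms comb)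

-- ===== LEMMAS AND PROOFS =====

-- keys used by the two programs
def keyA (s : String) : Option Char := PySem.Str.pyGet? s 0
def keyB (s : String) : String := PySem.Str.slice s none (some 1)

-- number of index-ordered pairs of elements with equal key
def pairsBy {κ : Type} [DecidableEq κ] (f : String → κ) : List String → Int
  | [] => 0
  | x :: xs => ((xs.countP (fun s => decide (f x = f s)) : Nat) : Int) + pairsBy f xs

def pairs {κ : Type} [BEq κ] : List κ → Int
  | [] => 0
  | x :: xs => ((xs.count x : Nat) : Int) + pairs xs

lemma pairs_map_eq_pairsBy {κ : Type} [BEq κ] [LawfulBEq κ] [DecidableEq κ] (f : String → κ)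
    (l : List String) : pairs (l.map f) = pairsBy f l := by
  induction l with
  | nil => rfl
  | cons x xs ih =>
    simp only [List.map_cons, pairs, pairsBy, ih, List.count, List.countP_map]
    refine congrArg (fun n => ((n : Nat) : Int) + pairsBy f xs) (List.countP_congr fun s _ => ?_)
    simp only [Function.comp_apply, beq_iff_eq, decide_eq_true_eq]
    exact eq_comm

lemma sum_range_eq_pairsBy (f : String → Option Char) (l : List String) :
    ((List.range l.length).map
      (fun k => (((l.drop (k+1)).countP (fun s => decide (f (l.getD k "") = f s)) : Nat) : Int))).sum
    = pairsBy f l := by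
  induction l with
  | nil => rfl
  | cons x xs ih =>
    simp only [List.length_cons, List.range_succ_eq_map, List.map_cons, List.map_map,
      List.sum_cons, pairsBy]
    refine congrArg₂ (· + ·) ?_ ?_
    · simp
    · rw [← ih]
      refine congrArg List.sum (List.map_congr_left fun k _ => ?_)
      simp [Function.comp, List.drop_succ_cons]

lemma inner_loop (l : List String) (key : Option Char) (i : Int) (h : 0 ≤ i) (acc : Int) :
    (PySem.List.pyRange (i + 1) (l.length : Int) 1).foldl
      (fun c j => if key = PySem.Str.pyGet? (PySem.List.pyGetD l j "") 0 then c + 1 else c) acc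
    = acc + (((l.drop (i+1).toNat).countP (fun s => decide (key = PySem.Str.pyGet? s 0)) : Nat) : Int) := by
  refine (PySem.List.foldl_pyRange_pyGetD' l ""
      (fun c s => if key = PySem.Str.pyGet? s 0 then c + 1 else c) acc (by omega)).trans ?_
  simpa using PySem.List.foldl_count_if
    (fun s => decide (key = PySem.Str.pyGet? s 0)) (l.drop (i+1).toNat) acc

lemma A_eq_pairsBy (l : List String) : count_homonyms l = pairsBy keyA l := by
  unfold count_homonyms
  refine Eq.trans (PySem.List.foldl_congr_mem' _ _
    (fun (c : Int) (i : Int) => c +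
      (((l.drop (i+1).toNat).countP
        (fun s => decide (PySem.Str.pyGet? (PySem.List.pyGetD l i "") 0 = PySem.Str.pyGet? s 0)) : Nat) : Int))
    0 (fun i hi acc => inner_loop l _ i (PySem.List.mem_pyRange_one.mp hi).1 acc)) ?_
  rw [PySem.List.foldl_add, zero_add, PySem.List.pyRange_zero_nat, List.map_map,
    ← sum_range_eq_pairsBy keyA l]
  refine congrArg List.sum (List.map_congr_left fun k _ => ?_)
  have hk : ((k : Int) + 1).toNat = k + 1 := by omega
  simp [keyA, Function.comp, hk]

lemma B_eq_sum (l : List String) :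
    count_homonyms_alt l
      = ((PySem.Set.ofList (l.map keyB)).map
          (fun k => PySem.Int.floordiv ((((l.map keyB).count k : Nat) : Int) * ((((l.map keyB).count k : Nat) : Int) - 1)) 2)).sum := by
  show ((l.foldl (fun d s => d.insert (keyB s) (d.getD (keyB s) 0 + 1)) PySem.Dict.empty).values).foldl
      (fun total c => total + PySem.Int.floordiv (c * (c - 1)) 2) 0 = _
  have hd : (l.foldl (fun d s => d.insert (keyB s) (d.getD (keyB s) 0 + 1)) PySem.Dict.empty)
      = PySem.Dict.counter (l.map keyB) := by
    rw [← PySem.Dict.foldl_insert_getD_add_one_eq_counter, List.foldl_map]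
  rw [hd]
  simp only [PySem.Dict.values]
  rw [PySem.Dict.items_counter, List.map_map, PySem.List.foldl_add, zero_add, List.map_map]
  rfl

lemma pairs_append {κ : Type} [BEq κ] [LawfulBEq κ] (ks : List κ) (x : κ) :
    pairs (ks ++ [x]) = pairs ks + ((ks.count x : Nat) : Int) := by
  induction ks with
  | nil => simp [pairs]
  | cons y ys ih =>
    simp only [List.cons_append, pairs, ih, List.count_append, List.count_cons]
    by_cases h : x = y
    · subst h; simp; ring
    · simp [beq_iff_eq, h, Ne.symm h]; ring

lemma c2_succ (n : Nat) :
    PySem.Int.floordiv ((↑n + 1) * (↑n + 1 - 1)) 2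
      = PySem.Int.floordiv ((↑n : Int) * (↑n - 1)) 2 + n := by
  obtain ⟨k, hk⟩ : Even ((↑n : Int) * (↑n - 1)) := by
    rcases Int.even_or_odd n with h | h
    · exact h.mul_right _
    · rcases h with ⟨m, hm⟩
      have he : Even ((n : Int) - 1) := ⟨m, by omega⟩
      exact he.mul_left _
  have e1 : (↑n : Int) * (↑n - 1) = 2 * k := by linarith [hk]
  have e2 : ((↑n : Int) + 1) * (↑n + 1 - 1) = 2 * (k + ↑n) := by nlinarith [hk]
  rw [e1, e2, PySem.Int.floordiv_eq_ediv_of_pos (by norm_num), PySem.Int.floordiv_eq_ediv_of_pos (by norm_num),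
      Int.mul_ediv_cancel_left _ (by norm_num : (2:Int) ≠ 0), Int.mul_ediv_cancel_left _ (by norm_num : (2:Int) ≠ 0)]

lemma sum_map_update {κ : Type} [BEq κ] [LawfulBEq κ] (l : List κ) (g g' : κ → Int) (x : κ)
    (hnd : l.Nodup) (hx : x ∈ l) (hg : ∀ k ∈ l, k ≠ x → g' k = g k) :
    (l.map g').sum = (l.map g).sum + (g' x - g x) := by
  induction l with
  | nil => cases hx
  | cons y ys ih =>
    rcases List.mem_cons.mp hx with rfl | hx'
    · have hcong : ∀ k ∈ ys, g' k = g k := fun k hk =>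
        hg k (List.mem_cons_of_mem _ hk) (fun h => (List.nodup_cons.mp hnd).1 (h ▸ hk))
      simp [List.map_congr_left hcong]; ring
    · have hyx : y ≠ x := fun h => (List.nodup_cons.mp hnd).1 (h ▸ hx')
      simp only [List.map_cons, List.sum_cons,
        ih (List.nodup_cons.mp hnd).2 hx' (fun k hk => hg k (List.mem_cons_of_mem _ hk)),
        hg y (List.mem_cons_self) hyx]
      ring

lemma sum_choose2_eq_pairs {κ : Type} [BEq κ] [LawfulBEq κ] (ks : List κ) :
    ((PySem.Set.ofList ks).map
      (fun k => PySem.Int.floordiv (((ks.count k : Nat) : Int) * ((((ks.count k : Nat) : Int)) - 1)) 2)).sum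
    = pairs ks := by
  induction ks using List.reverseRecOn with
  | nil => rfl
  | append_singleton ks x ih =>
    rw [pairs_append, ← ih]
    have hof : PySem.Set.ofList (ks ++ [x]) = PySem.Set.add (PySem.Set.ofList ks) x := by
      rw [PySem.Set.ofList_eq_foldl, PySem.Set.ofList_eq_foldl, List.foldl_append]
      rfl
    by_cases hx : x ∈ ks
    · have hmem : x ∈ PySem.Set.ofList ks := (PySem.Set.mem_ofList _ _).mpr hx
      rw [hof, PySem.Set.add_of_mem hmem]
      refine (sum_map_update (PySem.Set.ofList ks)
        (fun k => PySem.Int.floordiv (((ks.count k : Nat) : Int) * ((((ks.count k : Nat) : Int)) - 1)) 2)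
        (fun k => PySem.Int.floordiv ((((ks ++ [x]).count k : Nat) : Int) * ((((((ks ++ [x]).count k : Nat)) : Int)) - 1)) 2)
        x (PySem.Set.nodup_ofList _) hmem ?_).trans ?_
      · intro k hk hkx
        have : (ks ++ [x]).count k = ks.count k := by
          simp [List.count_append, Ne.symm hkx]
        simp only [this]
      · have hc : (ks ++ [x]).count x = ks.count x + 1 := by
          simp [List.count_append]
        rw [hc]
        have := c2_succ (ks.count x)
        push_cast at this ⊢
        linarith [this]
    · have hnmem : x ∉ PySem.Set.ofList ks := fun h => hx ((PySem.Set.mem_ofList _ _).mp h)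
      rw [hof, PySem.Set.add_of_not_mem hnmem, List.map_append, List.sum_append]
      have h0 : ks.count x = 0 := List.count_eq_zero.mpr hx
      have hone : (ks ++ [x]).count x = 1 := by simp [List.count_append, h0]
      have hrest : ∀ k ∈ PySem.Set.ofList ks, (ks ++ [x]).count k = ks.count k := by
        intro k hk
        have hkx : k ≠ x := fun h => hx (h ▸ (PySem.Set.mem_ofList _ _).mp hk)
        simp [List.count_append, Ne.symm hkx]
      rw [List.map_congr_left (fun k hk => by rw [hrest k hk])]
      simp [h0]

lemma pairsBy_congr {κ₁ κ₂ : Type} [DecidableEq κ₁] [DecidableEq κ₂] (f : String → κ₁) (g : String → κ₂)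
    (l : List String) (h : ∀ s ∈ l, ∀ t ∈ l, (f s = f t) ↔ (g s = g t)) :
    pairsBy f l = pairsBy g l := by
  induction l with
  | nil => rfl
  | cons x xs ih =>
    simp only [pairsBy]
    rw [List.countP_congr (fun s hs => ?_),
      ih (fun s hs t ht => h s (List.mem_cons_of_mem _ hs) t (List.mem_cons_of_mem _ ht))]
    simpa using h x List.mem_cons_self s (List.mem_cons_of_mem _ hs)

set_option maxHeartbeats 1000000 in
lemma key_agree (s t : String) (hs : s ≠ "") (ht : t ≠ "") :
    (keyA s = keyA t) ↔ (keyB s = keyB t) := by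
  have hs' : s.toList ≠ [] := fun h => hs (String.toList_eq_nil_iff.mp h)
  have ht' : t.toList ≠ [] := fun h => ht (String.toList_eq_nil_iff.mp h)
  obtain ⟨c, cs, hcs⟩ := List.exists_cons_of_ne_nil hs'
  obtain ⟨d, ds, hds⟩ := List.exists_cons_of_ne_nil ht'
  have hA1 : keyA s = some c := by rw [keyA]; simp [pysem, hcs]
  have hA2 : keyA t = some d := by rw [keyA]; simp [pysem, hds]
  have hB1 : (keyB s).toList = [c] := by rw [keyB]; simp [pysem, hcs]
  have hB2 : (keyB t).toList = [d] := by rw [keyB]; simp [pysem, hds]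
  rw [hA1, hA2, ← String.toList_inj, hB1, hB2]
  simp

-- ===== VERDICT (by name: the statement is the Claim_ definition above) =====
theorem count_homonyms_spec : Claim_equal_count_homonyms := by
  unfold Claim_equal_count_homonyms
  intro comb _ hpre
  unfold Spec_count_homonyms
  rw [A_eq_pairsBy, B_eq_sum, sum_choose2_eq_pairs, pairs_map_eq_pairsBy]
  rcases hpre with hlen | hne
  · cases comb with
    | nil => rfl
    | cons x xs =>
      cases xs with
      | nil => simp [pairsBy]
      | cons y ys => simp at hlen
  · exact pairsBy_congr keyA keyB comb
      (fun s hs t ht => key_agree s t (hne s hs) (hne t ht))
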